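-- pv_equiv track=rewrite | github.com/SurajBhar/advance_git | clip_scratch.py | _merge_word
-- ===== SOURCE A (Python) =====
-- from typing import Dict, List, Tuple, Optional
--
-- def _merge_word(word: List[str], pair: Tuple[str, str]) -> List[str]:
--     i = 0
--     merged: List[str] = []
--     while i < len(word):
--         if i < len(word) - 1 and (word[i], word[i + 1]) == pair:
--             merged.append(word[i] + word[i + 1])
--             i += 2
--         else:
--             merged.append(word[i])
--             i += 1
--     return merged
-- ===== SOURCE B (Python) =====
-- from typing import List, Tuple
--
-- def _merge_word(word: List[str], pair: Tuple[str, str]) -> List[str]: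
--     # Streaming state machine: scan tokens one at a time with a "holding" flag
--     # (a pending, unflushed occurrence of pair[0]); no indexing or lookahead.
--     a, b = pair
--     out: List[str] = []
--     holding = False
--     for t in word:
--         if holding:
--             if t == b:
--                 out.append(a + b)
--                 holding = False
--             elif t == a:
--                 out.append(a)          # flush the pending a, hold the new one
--             else:
--                 out.append(a)
--                 out.append(t)
--                 holding = False
--         elif t == a:
--             holding = True
--         else:
--             out.append(t)
--     if holding:
--         out.append(a)
--     return out
-- ===== Notes on version B (the rewrite author's own statement) =====
-- stated objective: alternative
-- what changed: Replaces A's indexed while-loop with two-token lookahead (word[i], word[i+1]) by a streaming state-machine fold: tokens are consumed one at a time and a 'holding' flag carries a pending unflushed occurrence of pair[0], so B never indexes the list and never looks ahead.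
import Mathlib
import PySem

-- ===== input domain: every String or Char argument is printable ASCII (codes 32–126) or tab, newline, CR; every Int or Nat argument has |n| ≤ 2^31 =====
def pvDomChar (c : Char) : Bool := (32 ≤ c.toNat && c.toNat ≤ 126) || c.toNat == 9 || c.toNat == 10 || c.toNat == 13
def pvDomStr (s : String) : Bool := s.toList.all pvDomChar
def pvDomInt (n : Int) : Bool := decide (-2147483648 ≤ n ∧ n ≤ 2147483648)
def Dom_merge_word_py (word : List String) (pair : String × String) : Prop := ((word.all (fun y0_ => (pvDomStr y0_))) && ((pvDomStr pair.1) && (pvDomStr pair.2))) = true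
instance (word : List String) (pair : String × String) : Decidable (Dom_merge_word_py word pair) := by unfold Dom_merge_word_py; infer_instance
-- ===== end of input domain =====

-- B is an alternative decomposition of the same O(n) task: a streaming state-machine fold
-- with a pending-token flag instead of A's indexed loop with two-token lookahead.

-- ===== PORT A =====
-- A's while-loop, recursing on the index i; 'merged' is built front to back
def mergeLoopA (word : List String) (pair : String × String) (i : Nat) : List String :=
  if _h : i < word.length then
    if i + 1 < word.length ∧ (word.getD i "", word.getD (i + 1) "") = pair then
      (word.getD i "" ++ word.getD (i + 1) "") :: mergeLoopA word pair (i + 2)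
    else
      word.getD i "" :: mergeLoopA word pair (i + 1)
  else []
termination_by word.length - i

def merge_word_py (word : List String) (pair : String × String) : List String :=
  mergeLoopA word pair 0

-- ===== PORT B =====
-- one step of B's for-loop: state = (out, holding); branches in Source B's order
def mergeStepB (a b : String) (st : List String × Bool) (t : String) : List String × Bool :=
  if st.2 then
    if t = b then (st.1 ++ [a ++ b], false)
    else if t = a then (st.1 ++ [a], true)
    else (st.1 ++ [a, t], false)
  else if t = a then (st.1, true)
  else (st.1 ++ [t], false)

def merge_word_py_alt (word : List String) (pair : String × String) : List String :=
  let st := word.foldl (mergeStepB pair.1 pair.2) ([], false)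
  if st.2 then st.1 ++ [pair.1] else st.1

-- ===== PRECONDITION & SPEC =====
def Spec_merge_word_py (word : List String) (pair : String × String) (out : List String) : Prop := out = merge_word_py_alt word pair
instance (word : List String) (pair : String × String) (out : List String) : Decidable (Spec_merge_word_py word pair out) := by unfold Spec_merge_word_py; infer_instance

-- ===== CLAIM =====
def Claim_equal_merge_word_py : Prop := ∀ (word : List String) (pair : String × String), Dom_merge_word_py word pair → Spec_merge_word_py word pair (merge_word_py word pair)

-- ===== LEMMAS AND PROOFS =====

-- structural (list) form of A's greedy merge, used only as a proof intermediary
def listMerge (a b : String) : List String → List String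
  | x :: y :: rest =>
      if x = a ∧ y = b then (a ++ b) :: listMerge a b rest
      else x :: listMerge a b (y :: rest)
  | [x] => [x]
  | [] => []

theorem listMerge_cons_ne (a b y : String) (rest : List String) (hy : y ≠ a) :
    listMerge a b (y :: rest) = y :: listMerge a b rest := by
  cases rest with
  | nil => simp [listMerge]
  | cons z rs =>
    rw [listMerge, if_neg (by rintro ⟨h1, -⟩; exact hy h1)]

-- A's index loop computes listMerge of the remaining suffix
theorem loopA_eq_listMerge_aux : ∀ (fuel : Nat) (word : List String) (a b : String) (i : Nat),
    word.length - i ≤ fuel → mergeLoopA word (a, b) i = listMerge a b (word.drop i) := by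
  intro fuel
  induction fuel with
  | zero =>
    intro word a b i hf
    have hi : ¬ i < word.length := by omega
    rw [mergeLoopA, dif_neg hi]
    rw [List.drop_eq_nil_of_le (by omega)]
    rfl
  | succ fuel ih =>
    intro word a b i hf
    by_cases hi : i < word.length
    · have hdrop : word.drop i = word.getD i "" :: word.drop (i + 1) := by
        rw [List.getD_eq_getElem word "" hi]
        exact List.drop_eq_getElem_cons hi
      rw [mergeLoopA, dif_pos hi]
      by_cases hnext : i + 1 < word.length
      · have hdrop1 : word.drop (i + 1) = word.getD (i + 1) "" :: word.drop (i + 2) := by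
          rw [List.getD_eq_getElem word "" hnext]
          exact List.drop_eq_getElem_cons hnext
        rw [hdrop, hdrop1]
        unfold listMerge
        by_cases hp : word.getD i "" = a ∧ word.getD (i + 1) "" = b
        · have hA : i + 1 < word.length ∧ (word.getD i "", word.getD (i + 1) "") = (a, b) := by
            exact ⟨hnext, by rw [hp.1, hp.2]⟩
          rw [if_pos hA, if_pos hp, hp.1, hp.2, ih word a b (i + 2) (by omega)]
        · have hA : ¬ (i + 1 < word.length ∧ (word.getD i "", word.getD (i + 1) "") = (a, b)) := by
            rintro ⟨-, hpe⟩
            exact hp ⟨congrArg Prod.fst hpe, congrArg Prod.snd hpe⟩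
          rw [if_neg hA, if_neg hp, ih word a b (i + 1) (by omega), hdrop1]
      · have hA : ¬ (i + 1 < word.length ∧ (word.getD i "", word.getD (i + 1) "") = (a, b)) := by
          rintro ⟨h1, -⟩; exact hnext h1
        have hnil : word.drop (i + 1) = [] := List.drop_eq_nil_of_le (by omega)
        rw [if_neg hA, ih word a b (i + 1) (by omega), hnil, hdrop, hnil]
        rfl
    · rw [mergeLoopA, dif_neg hi, List.drop_eq_nil_of_le (by omega)]
      rfl

-- the post-loop flush of Source B's pending token, as a named helper for the induction
def finishB (a : String) (st : List String × Bool) : List String :=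
  if st.2 then st.1 ++ [a] else st.1

-- B's fold computes listMerge: both start states at once
theorem foldB_eq_listMerge (a b : String) : ∀ (l : List String) (out : List String),
    finishB a (l.foldl (mergeStepB a b) (out, false)) = out ++ listMerge a b l
    ∧ finishB a (l.foldl (mergeStepB a b) (out, true)) = out ++ listMerge a b (a :: l) := by
  intro l
  induction l with
  | nil =>
    intro out
    constructor
    · simp [finishB, listMerge]
    · simp [finishB, listMerge]
  | cons y rest ih =>
    intro out
    constructor
    · by_cases hya : y = a
      · have hstep : mergeStepB a b (out, false) y = (out, true) := by
          unfold mergeStepB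
          rw [if_neg (show ¬ ((out, false) : List String × Bool).2 = true by simp), if_pos hya]
        rw [List.foldl_cons, hstep, (ih out).2, hya]
      · have hstep : mergeStepB a b (out, false) y = (out ++ [y], false) := by
          unfold mergeStepB
          rw [if_neg (show ¬ ((out, false) : List String × Bool).2 = true by simp), if_neg hya]
        rw [List.foldl_cons, hstep, (ih (out ++ [y])).1,
            listMerge_cons_ne a b y rest hya]
        simp
    · by_cases hyb : y = b
      · subst hyb
        have hstep : mergeStepB a y (out, true) y = (out ++ [a ++ y], false) := by
          unfold mergeStepB
          rw [if_pos (show ((out, true) : List String × Bool).2 = true from rfl), if_pos rfl]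
        have h1 : listMerge a y (a :: y :: rest) = (a ++ y) :: listMerge a y rest := by
          rw [listMerge, if_pos ⟨rfl, rfl⟩]
        rw [List.foldl_cons, hstep, (ih (out ++ [a ++ y])).1, h1]
        simp
      · by_cases hya : y = a
        · have hstep : mergeStepB a b (out, true) y = (out ++ [a], true) := by
            unfold mergeStepB
            rw [if_pos (show ((out, true) : List String × Bool).2 = true from rfl), if_neg hyb, if_pos hya]
          have h1 : listMerge a b (a :: y :: rest) = a :: listMerge a b (a :: rest) := by
            rw [listMerge, if_neg (by rintro ⟨-, h⟩; exact hyb h), hya]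
          rw [List.foldl_cons, hstep, (ih (out ++ [a])).2, h1]
          simp
        · have hstep : mergeStepB a b (out, true) y = (out ++ [a, y], false) := by
            unfold mergeStepB
            rw [if_pos (show ((out, true) : List String × Bool).2 = true from rfl), if_neg hyb, if_neg hya]
          have h1 : listMerge a b (a :: y :: rest) = a :: listMerge a b (y :: rest) := by
            rw [listMerge, if_neg (by rintro ⟨-, h⟩; exact hyb h)]
          rw [List.foldl_cons, hstep, (ih (out ++ [a, y])).1, h1,
              listMerge_cons_ne a b y rest hya]
          simp
-- ===== VERDICT =====
theorem merge_word_py_spec : Claim_equal_merge_word_py := by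
  intro word pair _
  unfold Spec_merge_word_py merge_word_py merge_word_py_alt
  obtain ⟨a, b⟩ := pair
  rw [loopA_eq_listMerge_aux (word.length) word a b 0 (by omega)]
  exact ((foldB_eq_listMerge a b word []).1).symm
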